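-- pv_equiv track=rewrite | github.com/nc1729/ternary_computer | assemble_instr.py | value_to_tryte
-- ===== SOURCE A (Python) =====
-- def value_to_tryte(value):
--     septavingt_chars = "MLKJIHGFEDCBA0abcdefghijklm"
--     output_string = ""
--     dividend = int(value)
--     remainder = 0
--     for i in range(3):
--         remainder = dividend % 27
--         dividend = dividend // 27
--         if (remainder > 13):
--             remainder -= 27
--             dividend += 1
--         elif (remainder < -13):
--             remainder += 27
--             dividend -= 1
--         output_string += septavingt_chars[13 + remainder]
--     return output_string[::-1]
-- ===== SOURCE B (Python) =====
-- def value_to_tryte(value):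
--     table = "MLKJIHGFEDCBA0abcdefghijklm"
--     n = int(value) + 9841
--     chars = []
--     for _ in range(3):
--         chars.append(table[n % 27])
--         n //= 27
--     return "".join(reversed(chars))
-- ===== Notes on version B (the rewrite author's own statement) =====
-- stated objective: simpler
-- what changed: Replaces the balanced-digit extraction with its carry/borrow conditionals by a single +9841 offset followed by plain unbranched base-27 digit extraction, collecting digits least-significant-first and reversing at the end.
import Mathlib
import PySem

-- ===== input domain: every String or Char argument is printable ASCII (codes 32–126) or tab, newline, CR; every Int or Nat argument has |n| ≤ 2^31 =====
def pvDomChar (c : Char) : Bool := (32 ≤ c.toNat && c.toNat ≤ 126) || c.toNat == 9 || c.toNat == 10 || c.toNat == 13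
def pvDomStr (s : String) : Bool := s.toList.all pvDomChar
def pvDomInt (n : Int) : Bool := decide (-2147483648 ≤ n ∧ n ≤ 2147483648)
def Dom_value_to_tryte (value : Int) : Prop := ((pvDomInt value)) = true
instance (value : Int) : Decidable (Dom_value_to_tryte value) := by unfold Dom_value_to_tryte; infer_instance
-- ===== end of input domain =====

-- B replaces A's balanced-digit loop with carry conditionals by one +9841 offset and three
-- unbranched base-27 digit extractions (simpler; same result).

-- ===== PORT A =====
def septavingtCharsA : List Char := "MLKJIHGFEDCBA0abcdefghijklm".toList

-- loop body of A's 'for i in range(3)': balanced remainder/dividend adjustment, then append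
def aStep (s : List Char × Int) (_ : Int) : List Char × Int :=
  let r := PySem.Int.mod s.2 27
  let d := PySem.Int.floordiv s.2 27
  let rd : Int × Int :=
    if r > 13 then (r - 27, d + 1)
    else if r < -13 then (r + 27, d - 1)
    else (r, d)
  (s.1 ++ [PySem.List.pyGetD septavingtCharsA (13 + rd.1) ' '], rd.2)

def value_to_tryte (value : Int) : String :=
  let s := (PySem.List.pyRange 0 3 1).foldl aStep ([], value)
  -- output_string[::-1]; step -1 ≠ 0 so slice? is always some (getD is a totality guard)
  String.ofList ((PySem.List.slice? s.1 none none (-1)).getD [])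

-- ===== PORT B =====
def septavingtCharsB : List Char := "MLKJIHGFEDCBA0abcdefghijklm".toList

-- loop body of B's 'for _ in range(3)': plain base-27 digit, no branches
def bStep (s : List Char × Int) (_ : Int) : List Char × Int :=
  (s.1 ++ [PySem.List.pyGetD septavingtCharsB (PySem.Int.mod s.2 27) ' '],
   PySem.Int.floordiv s.2 27)

def value_to_tryte_alt (value : Int) : String :=
  let s := (PySem.List.pyRange 0 3 1).foldl bStep ([], value + 9841)
  String.ofList s.1.reverse

-- ===== PRECONDITION & SPEC =====
def Spec_value_to_tryte (value : Int) (out : String) : Prop := out = value_to_tryte_alt value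
instance (value : Int) (out : String) : Decidable (Spec_value_to_tryte value out) := by unfold Spec_value_to_tryte; infer_instance

-- ===== CLAIM (what is proved, stated in full; the proofs are below) =====
def Claim_equal_value_to_tryte : Prop := ∀ (value : Int), Dom_value_to_tryte value → Spec_value_to_tryte value (value_to_tryte value)

-- ===== LEMMAS AND PROOFS =====

-- one loop step: if B's running value is A's dividend plus an offset c = 13 + 27*c',
-- both append the same character and the offsets shrink from c to c'.
lemma step_agree (d c c' : Int) (h : c = 13 + 27 * c') (l : List Char) (i j : Int) :
    bStep (l, d + c) i = ((aStep (l, d) j).1, (aStep (l, d) j).2 + c') := by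
  have hm := PySem.Int.mod_eq_emod_of_pos (a := d) (b := 27) (by omega)
  have hm' := PySem.Int.mod_eq_emod_of_pos (a := d + c) (b := 27) (by omega)
  have hd := PySem.Int.floordiv_eq_ediv_of_pos (a := d) (b := 27) (by omega)
  have hd' := PySem.Int.floordiv_eq_ediv_of_pos (a := d + c) (b := 27) (by omega)
  have h1 : (d : Int) % 27 = d - 27 * (d / 27) := by
    have := Int.mul_ediv_add_emod d 27; omega
  have h2 : (d + c) % 27 = d + c - 27 * ((d + c) / 27) := by
    have := Int.mul_ediv_add_emod (d + c) 27; omega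
  have hb1 : 0 ≤ d % 27 ∧ d % 27 < 27 := ⟨Int.emod_nonneg _ (by omega), Int.emod_lt_of_pos _ (by omega)⟩
  have hb2 : 0 ≤ (d + c) % 27 ∧ (d + c) % 27 < 27 :=
    ⟨Int.emod_nonneg _ (by omega), Int.emod_lt_of_pos _ (by omega)⟩
  simp only [aStep, bStep, hm, hm', hd, hd', septavingtCharsA, septavingtCharsB]
  split_ifs with h13 hneg
  · have hidx : (d + c) % 27 = 13 + (d % 27 - 27) := by omega
    have hdiv : (d + c) / 27 = d / 27 + 1 + c' := by omega
    rw [hidx, hdiv]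
  · omega
  · have hidx : (d + c) % 27 = 13 + d % 27 := by omega
    have hdiv : (d + c) / 27 = d / 27 + c' := by omega
    rw [hidx, hdiv]

lemma range3 : PySem.List.pyRange 0 3 1 = [0, 1, 2] := by decide

lemma main_eq (value : Int) : value_to_tryte value = value_to_tryte_alt value := by
  unfold value_to_tryte value_to_tryte_alt
  rw [range3]
  simp only [List.foldl]
  rw [step_agree value 9841 364 (by ring) [] 0 0,
      step_agree _ 364 13 (by ring) _ 1 1,
      step_agree _ 13 0 (by ring) _ 2 2]
  rw [PySem.List.slice?_none_none_neg_one]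
  simp

-- ===== VERDICT (by name: the statement is the Claim_ definition above) =====
theorem value_to_tryte_spec : Claim_equal_value_to_tryte := by
  intro value _
  exact main_eq value
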